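-- pv_equiv track=rewrite | github.com/hooehu/test_agent_compare | responsive_checker.py | _detect_severity
-- ===== SOURCE A (Python) =====
-- def _detect_severity(issues: list) -> str:
--     if not issues:
--         return "ok"
--     errors   = [i for i in issues if i["type"] == "error"]
--     warnings = [i for i in issues if i["type"] == "warning"]
--     if errors:
--         return "critical" if len(errors) > 3 else "major"
--     if warnings:
--         return "minor"
--     return "ok"
-- ===== SOURCE B (Python) =====
-- _LEVELS = ("ok", "minor", "major", "critical")
-- _RANK = {"error": 2, "warning": 1}
--
-- def _detect_severity(issues: list) -> str:
--     # Severity as a max-semilattice: each issue maps to a rank (error=2,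
--     # warning=1, other=0); the overall level is the max rank, bumped to 3
--     # (critical) when more than three rank-2 issues occur; answer by table lookup.
--     level = 0
--     errs = 0
--     for i in issues:
--         r = _RANK.get(i["type"], 0)
--         if r > level:
--             level = r
--         if r == 2:
--             errs += 1
--     return _LEVELS[3 if errs > 3 else level]
-- ===== Notes on version B (the rewrite author's own statement) =====
-- stated objective: alternative
-- what changed: Replaces the empty-guard, two filtering comprehensions and the early-return branch chain with a max-semilattice fold (each issue mapped to a numeric rank via a dict, overall level = max rank, bumped to 3 when more than three errors) followed by a table lookup into a severity tuple.
import Mathlib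
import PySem

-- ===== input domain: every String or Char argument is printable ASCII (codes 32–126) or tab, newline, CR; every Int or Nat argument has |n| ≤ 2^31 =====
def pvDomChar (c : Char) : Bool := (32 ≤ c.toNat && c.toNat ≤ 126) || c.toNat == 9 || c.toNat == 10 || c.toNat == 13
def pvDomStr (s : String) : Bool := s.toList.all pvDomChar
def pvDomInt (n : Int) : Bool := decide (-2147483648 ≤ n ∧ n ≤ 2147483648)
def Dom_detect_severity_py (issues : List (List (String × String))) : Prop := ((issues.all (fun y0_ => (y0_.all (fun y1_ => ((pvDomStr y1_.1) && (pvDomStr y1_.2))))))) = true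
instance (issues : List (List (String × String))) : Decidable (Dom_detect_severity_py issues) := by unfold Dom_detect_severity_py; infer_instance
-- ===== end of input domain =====

-- B replaces A's two filtering comprehensions and branch chain with a max-rank fold plus table lookup (alternative decomposition, same cost).


-- ===== PORT A =====
-- i["type"] is the first-match association-list lookup; getD "" is reached only outside Pre_ (where Python raises KeyError)
def pvTypeOf (i : List (String × String)) : String := (List.lookup "type" i).getD ""

def detect_severity_py (issues : List (List (String × String))) : String :=
  if issues = [] then "ok"
  else
    let errors := issues.filter (fun i => pvTypeOf i == "error")
    let warnings := issues.filter (fun i => pvTypeOf i == "warning")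
    if errors ≠ [] then (if errors.length > 3 then "critical" else "major")
    else if warnings ≠ [] then "minor"
    else "ok"

-- ===== PORT B =====
def pvLEVELS : List String := ["ok", "minor", "major", "critical"]
def pvRANK : PySem.Dict String Int := PySem.Dict.ofList [("error", 2), ("warning", 1)]

def pvRankStep (c : Int × Int) (i : List (String × String)) : Int × Int :=
  let r := PySem.Dict.getD pvRANK (pvTypeOf i) 0
  let level := if r > c.1 then r else c.1
  let errs := if r == 2 then c.2 + 1 else c.2
  (level, errs)

def detect_severity_py_alt (issues : List (List (String × String))) : String :=
  let c := issues.foldl pvRankStep (0, 0)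
  (PySem.List.pyGet? pvLEVELS (if c.2 > 3 then 3 else c.1)).getD ""

-- ===== PRECONDITION & SPEC =====
-- Pre_ excludes exactly the inputs where some issue lacks a "type" key: there both Pythons raise KeyError.
def Pre_detect_severity_py (issues : List (List (String × String))) : Prop :=
  ∀ i ∈ issues, (List.lookup "type" i).isSome = true
instance (issues : List (List (String × String))) : Decidable (Pre_detect_severity_py issues) := by unfold Pre_detect_severity_py; infer_instance
def pvWitness_detect_severity_py : (List (List (String × String))) := [[("type", "error")], [("type", "warning")]]

def Spec_detect_severity_py (issues : List (List (String × String))) (out : String) : Prop := out = detect_severity_py_alt issues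
instance (issues : List (List (String × String))) (out : String) : Decidable (Spec_detect_severity_py issues out) := by unfold Spec_detect_severity_py; infer_instance

-- ===== CLAIM (what is proved, stated in full; the proofs are below) =====
def Claim_equal_detect_severity_py : Prop := ∀ (issues : List (List (String × String))), Dom_detect_severity_py issues → Pre_detect_severity_py issues → Spec_detect_severity_py issues (detect_severity_py issues)

-- ===== LEMMAS AND PROOFS =====
def pvRankOf (i : List (String × String)) : Int := PySem.Dict.getD pvRANK (pvTypeOf i) 0

lemma pvRankOf_cases (i : List (String × String)) :
    pvRankOf i = if pvTypeOf i = "error" then 2 else if pvTypeOf i = "warning" then 1 else 0 := by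
  unfold pvRankOf
  have hit : pvRANK = PySem.Dict.mk [("error", (2:Int)), ("warning", 1)] := by decide
  rw [hit]
  by_cases he : pvTypeOf i = "error"
  · simp [PySem.Dict.getD, PySem.Dict.get?_mk_cons, he]
  · by_cases hw : pvTypeOf i = "warning"
    · simp [PySem.Dict.getD, PySem.Dict.get?_mk_cons, he, hw, Ne.symm he]
    · simp [PySem.Dict.getD, PySem.Dict.get?_mk_cons, he, hw, Ne.symm he, Ne.symm hw, PySem.Dict.get?]

-- overall level of a list of issues, as A sees it via its two filters
def pvSevOf (issues : List (List (String × String))) : Int :=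
  if issues.filter (fun i => pvTypeOf i == "error") ≠ [] then 2
  else if issues.filter (fun i => pvTypeOf i == "warning") ≠ [] then 1 else 0

lemma pvSevOf_bounds (issues : List (List (String × String))) :
    0 ≤ pvSevOf issues ∧ pvSevOf issues ≤ 2 := by
  unfold pvSevOf; split_ifs <;> omega

lemma pvFold_counts (issues : List (List (String × String))) (l e : Int) (hl : 0 ≤ l) :
    issues.foldl pvRankStep (l, e) =
      (max l (pvSevOf issues),
       e + (issues.countP (fun i => pvTypeOf i == "error") : Int)) := by
  induction issues generalizing l e with
  | nil =>
    simp only [List.foldl_nil, List.countP_nil, pvSevOf, List.filter_nil]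
    simp
    omega
  | cons i rest ih =>
    have hr := pvRankOf_cases i
    have hbr := pvSevOf_bounds rest
    by_cases he : pvTypeOf i = "error"
    · have h2 : pvRankOf i = 2 := by rw [hr]; simp [he]
      have hstep : pvRankStep (l, e) i = (max l 2, e + 1) := by
        simp only [pvRankStep,
          show PySem.Dict.getD pvRANK (pvTypeOf i) 0 = pvRankOf i from rfl, h2,
          Prod.mk.injEq]
        exact ⟨by omega, by norm_num⟩
      have hsev : pvSevOf (i :: rest) = 2 := by
        unfold pvSevOf; simp [List.filter_cons, he]
      rw [List.foldl_cons, hstep, ih _ _ (by omega), hsev, List.countP_cons,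
        Prod.mk.injEq]
      refine ⟨by omega, ?_⟩
      simp only [he]
      push_cast
      simp
      ring
    · by_cases hw : pvTypeOf i = "warning"
      · have h1 : pvRankOf i = 1 := by rw [hr]; simp [he, hw]
        have hstep : pvRankStep (l, e) i = (max l 1, e) := by
          simp only [pvRankStep,
            show PySem.Dict.getD pvRANK (pvTypeOf i) 0 = pvRankOf i from rfl, h1,
            Prod.mk.injEq]
          exact ⟨by omega, by norm_num⟩
        have hsev : pvSevOf (i :: rest) = max 1 (pvSevOf rest) := by
          unfold pvSevOf; simp only [List.filter_cons, he, hw]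
          split_ifs <;> simp_all <;> omega
        rw [List.foldl_cons, hstep, ih _ _ (by omega), hsev, List.countP_cons,
          Prod.mk.injEq]
        refine ⟨by omega, ?_⟩
        simp [he]
      · have h0 : pvRankOf i = 0 := by rw [hr]; simp [he, hw]
        have hstep : pvRankStep (l, e) i = (l, e) := by
          simp only [pvRankStep,
            show PySem.Dict.getD pvRANK (pvTypeOf i) 0 = pvRankOf i from rfl, h0,
            Prod.mk.injEq]
          exact ⟨by omega, by norm_num⟩
        have hsev : pvSevOf (i :: rest) = pvSevOf rest := by
          unfold pvSevOf; simp [List.filter_cons, he, hw]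
        rw [List.foldl_cons, hstep, ih _ _ hl, hsev, List.countP_cons]
        simp [he]

-- ===== VERDICT (by name: the statement is the Claim_ definition above) =====
theorem detect_severity_py_spec : Claim_equal_detect_severity_py := by
  intro issues _ _
  unfold Spec_detect_severity_py detect_severity_py detect_severity_py_alt
  have hfold := pvFold_counts issues 0 0 le_rfl
  rw [hfold]
  set ce := issues.countP (fun i => pvTypeOf i == "error") with hce
  have hle : (issues.filter (fun i => pvTypeOf i == "error")).length = ce :=
    List.countP_eq_length_filter.symm
  by_cases hnil : issues = []
  · subst hnil
    simp [pvSevOf, pvLEVELS, PySem.List.pyGet?, PySem.List.pyIdx?]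
  · simp only [if_neg hnil]
    by_cases he : (issues.filter (fun i => pvTypeOf i == "error")) = []
    · have hce0 : ce = 0 := by rw [← hle, he]; rfl
      by_cases hw : (issues.filter (fun i => pvTypeOf i == "warning")) = []
      · have hsev : pvSevOf issues = 0 := by unfold pvSevOf; simp [he, hw]
        simp [he, hw, hsev, hce0, pvLEVELS, PySem.List.pyGet?, PySem.List.pyIdx?]
      · have hsev : pvSevOf issues = 1 := by unfold pvSevOf; simp [he, hw]
        simp [he, hw, hsev, hce0, pvLEVELS, PySem.List.pyGet?, PySem.List.pyIdx?]
    · have hcep : 0 < ce := by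
        rw [← hle]; exact List.length_pos_iff.mpr he
      have hsev : pvSevOf issues = 2 := by unfold pvSevOf; simp [he]
      by_cases hgt : (issues.filter (fun i => pvTypeOf i == "error")).length > 3
      · have h4 : 3 < ce := by omega
        simp [he, hgt, hsev, h4, pvLEVELS, PySem.List.pyGet?, PySem.List.pyIdx?]
      · have h4 : ¬ 3 < ce := by omega
        simp [he, hgt, hsev, h4, pvLEVELS, PySem.List.pyGet?, PySem.List.pyIdx?]
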